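-- pv_equiv track=rewrite | github.com/omerKkemal/oh-tool-v2 | utility/email_temp.py | _inline_styles
-- ===== SOURCE A (Python) =====
-- def _inline_styles(content):
--     """Convert CSS classes to inline styles for email compatibility"""
--     styles_map = {
--         'class="status-indicator"': 'style="display: inline-block; background-color: rgba(212, 175, 55, 0.1); border: 2px solid #d4af37; border-radius: 25px; padding: 10px 20px; color: #8b6e1f; font-family: Arial, sans-serif; font-size: 14px; font-weight: bold; margin: 15px 0; text-transform: uppercase; letter-spacing: 0.5px;"',
--         'class="message-box"': 'style="background-color: #fefefe; border-left: 4px solid #d4af37; border: 2px solid #f0f0f0; padding: 25px; margin: 25px 0; border-radius: 8px; box-shadow: 0 2px 8px rgba(0,0,0,0.05);"',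
--         'class="btn-container"': 'style="text-align: center; margin: 30px 0 20px;"',
--         'class="btn"': 'style="display: inline-block; background: linear-gradient(135deg, #d4af37 0%, #f7ef8a 100%); color: #1a1a1a; text-decoration: none; padding: 16px 36px; font-family: Arial, sans-serif; font-size: 16px; font-weight: bold; border-radius: 6px; margin: 10px 0; border: none; box-shadow: 0 4px 12px rgba(212, 175, 55, 0.3);"',
--         'class="info-grid"': 'style="margin: 25px 0;"',
--         'class="info-item"': 'style="background-color: #f8f9fa; border: 2px solid #e9ecef; border-left: 4px solid #d4af37; padding: 20px; margin-bottom: 15px; border-radius: 6px;"',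
--         'class="info-label"': 'style="color: #8b6e1f; font-family: Arial, sans-serif; font-size: 12px; font-weight: bold; text-transform: uppercase; letter-spacing: 0.5px; margin-bottom: 8px;"',
--         'class="info-value"': 'style="color: #2d2d2d; font-family: Arial, sans-serif; font-size: 16px; font-weight: bold;"',
--         'class="warning"': 'style="background-color: rgba(212, 175, 55, 0.08); border-left: 4px solid #d4af37; padding: 16px 20px; margin: 20px 0; color: #8b6e1f; font-family: Arial, sans-serif; font-size: 14px; border-radius: 6px; border: 1px solid rgba(212, 175, 55, 0.2);"',
--         'class="terminal-container"': 'style="margin: 25px 0;"',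
--         'class="terminal"': 'style="background-color: #2d2d2d; border: 2px solid #d4af37; border-radius: 8px; font-family: Courier New, monospace; overflow: hidden;"',
--         'class="terminal-header"': 'style="background-color: #3d3d3d; padding: 15px 20px; border-bottom: 2px solid #d4af37;"',
--         'class="terminal-body"': 'style="padding: 20px; color: #ffffff; font-family: Courier New, monospace; font-size: 14px; line-height: 1.5;"',
--         'class="prompt"': 'style="color: #d4af37; font-weight: bold;"',
--         'class="command"': 'style="color: #ffffff; font-weight: 500;"',
--         'class="output"': 'style="color: #b0b0b0;"',
--         'class="feature-grid"': 'style="margin: 25px 0;"',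
--         'class="feature-item"': 'style="background-color: #f8f9fa; border: 1px solid #e9ecef; padding: 15px; margin-bottom: 12px; border-radius: 6px; border-left: 3px solid #d4af37;"',
--     }
--
--     for class_name, inline_style in styles_map.items():
--         content = content.replace(class_name, inline_style)
--
--     return content
-- ===== SOURCE B (Python) =====
-- # B: single left-to-right scan; on seeing 'class="' it reads the class NAME up
-- # to the closing quote and consults a dict keyed by the name alone, instead of
-- # A's 18 sequential full-string .replace passes keyed by whole attributes.
-- _ATTR = 'class="'
--
-- _STYLES_BY_NAME = {
--     'status-indicator': 'style="display: inline-block; background-color: rgba(212, 175, 55, 0.1); border: 2px solid #d4af37; border-radius: 25px; padding: 10px 20px; color: #8b6e1f; font-family: Arial, sans-serif; font-size: 14px; font-weight: bold; margin: 15px 0; text-transform: uppercase; letter-spacing: 0.5px;"',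
--     'message-box': 'style="background-color: #fefefe; border-left: 4px solid #d4af37; border: 2px solid #f0f0f0; padding: 25px; margin: 25px 0; border-radius: 8px; box-shadow: 0 2px 8px rgba(0,0,0,0.05);"',
--     'btn-container': 'style="text-align: center; margin: 30px 0 20px;"',
--     'btn': 'style="display: inline-block; background: linear-gradient(135deg, #d4af37 0%, #f7ef8a 100%); color: #1a1a1a; text-decoration: none; padding: 16px 36px; font-family: Arial, sans-serif; font-size: 16px; font-weight: bold; border-radius: 6px; margin: 10px 0; border: none; box-shadow: 0 4px 12px rgba(212, 175, 55, 0.3);"',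
--     'info-grid': 'style="margin: 25px 0;"',
--     'info-item': 'style="background-color: #f8f9fa; border: 2px solid #e9ecef; border-left: 4px solid #d4af37; padding: 20px; margin-bottom: 15px; border-radius: 6px;"',
--     'info-label': 'style="color: #8b6e1f; font-family: Arial, sans-serif; font-size: 12px; font-weight: bold; text-transform: uppercase; letter-spacing: 0.5px; margin-bottom: 8px;"',
--     'info-value': 'style="color: #2d2d2d; font-family: Arial, sans-serif; font-size: 16px; font-weight: bold;"',
--     'warning': 'style="background-color: rgba(212, 175, 55, 0.08); border-left: 4px solid #d4af37; padding: 16px 20px; margin: 20px 0; color: #8b6e1f; font-family: Arial, sans-serif; font-size: 14px; border-radius: 6px; border: 1px solid rgba(212, 175, 55, 0.2);"',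
--     'terminal-container': 'style="margin: 25px 0;"',
--     'terminal': 'style="background-color: #2d2d2d; border: 2px solid #d4af37; border-radius: 8px; font-family: Courier New, monospace; overflow: hidden;"',
--     'terminal-header': 'style="background-color: #3d3d3d; padding: 15px 20px; border-bottom: 2px solid #d4af37;"',
--     'terminal-body': 'style="padding: 20px; color: #ffffff; font-family: Courier New, monospace; font-size: 14px; line-height: 1.5;"',
--     'prompt': 'style="color: #d4af37; font-weight: bold;"',
--     'command': 'style="color: #ffffff; font-weight: 500;"',
--     'output': 'style="color: #b0b0b0;"',
--     'feature-grid': 'style="margin: 25px 0;"',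
--     'feature-item': 'style="background-color: #f8f9fa; border: 1px solid #e9ecef; padding: 15px; margin-bottom: 12px; border-radius: 6px; border-left: 3px solid #d4af37;"',}
--
-- def _inline_styles(content):
--     """Convert CSS classes to inline styles for email compatibility"""
--     out = []
--     i, n = 0, len(content)
--     while i < n:
--         if content.startswith(_ATTR, i):
--             j = content.find('"', i + len(_ATTR))
--             if j != -1:
--                 style = _STYLES_BY_NAME.get(content[i + len(_ATTR):j])
--                 if style is not None:
--                     out.append(style)
--                     i = j + 1
--                     continue
--         out.append(content[i])
--         i += 1
--     return ''.join(out)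
-- ===== Notes on version B (the rewrite author's own statement) =====
-- stated objective: alternative
-- what changed: Replaced A's 18 sequential full-string replace passes, each keyed by a whole quoted class attribute, with a single left-to-right scan that detects the attribute prefix, extracts the class name up to the closing quote and consults a dict keyed by the name alone.
import Mathlib
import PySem

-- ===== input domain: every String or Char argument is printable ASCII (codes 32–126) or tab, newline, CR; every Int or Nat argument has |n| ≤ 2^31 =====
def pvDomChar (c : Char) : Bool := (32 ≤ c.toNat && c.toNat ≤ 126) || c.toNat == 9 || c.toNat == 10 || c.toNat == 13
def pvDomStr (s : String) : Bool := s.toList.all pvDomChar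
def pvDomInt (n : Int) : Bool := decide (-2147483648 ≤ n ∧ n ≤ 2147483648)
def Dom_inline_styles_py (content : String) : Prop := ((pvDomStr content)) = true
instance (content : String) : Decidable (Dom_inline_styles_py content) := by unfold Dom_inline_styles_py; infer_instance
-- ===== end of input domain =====

-- B replaces A's 18 sequential full-string .replace passes (keyed by whole 'class="…"'
-- attributes) by ONE left-to-right scan that, on seeing 'class="', reads the class NAME up
-- to the closing quote and consults a table keyed by the name alone; return values proved equal.
--
-- Representation note: the long style strings are stored as ASCII byte lists packed into Nat
-- literals and decoded (A-side: little-endian via natToBytesF; B-side: big-endian via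
-- natToBytesB), because Lean's String.toList on long literals is not practically
-- kernel-reducible; each entry carries its plaintext as a comment, and the differential test
-- checks both ports against the Python tables character by character.

-- ===== PORT A =====
def natToBytesF : Nat → Nat → List Nat
  | 0, _ => []
  | _+1, 0 => []
  | f+1, n+1 => ((n+1) % 256) :: natToBytesF f ((n+1) / 256)

-- styles_map = { 'class="…"': 'style="…"', … }  (the 18 pairs, as ASCII code lists)
def pairsN : List (List Nat × List Nat) := [
  -- class="status-indicator"
  (natToBytesF 24 844638305080418381894393877897740642059121693182560136291, natToBytesF 291 8395104419171687162030374795838088326151591776024464477311585508947180520439915311338620596687640317030351775458141063782355971666319539586289784027227931858489391658772932923770668092624245936000969582460924473116187479836832726194656874590051826331192700738743335455027511556856621828566309054272813809250636128174794278998585943266146011662842150356540494415685893946698763470106608399499228035275965941422407873023790668944112455622833351363290689657989830505502447627547749901362803402935616264925679637793164956111515240039948513374029869278716705059632815789811392093263661697129033448433357670463782715144878144709638477065405222804873232480162309611357252793023382409349096808447226007876723),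
  -- class="message-box"
  (natToBytesF 19 768716712904634300165401664645079127294045283, natToBytesF 184 17471672320325970617000903221663955559044340645127110066970911367911316805243880857637408539183494634154047737189583336791095568383156322662399472812093192898777158807436291227789709108231885095704665656589515161745752789599214500642888347443144452804904870710899555805485701265711106058535501593041596620423828484361702995923175013118341690535711297360279842213373850386830858367218433255175397896511533148890057657680775017362524664745260147),
  -- class="btn-container"
  (natToBytesF 21 50344142610600309199867630873936478453694130646115, natToBytesF 48 5268834189453311336110195699506138626147232836792486992437821146038366927606956079703813691412331136063153471321203),
  -- class="btn"
  (natToBytesF 11 41625085073607534212901987, natToBytesF 318 884076458579471988465562877328696248937483753634072254178430076146414576314084373873853999610224055682019863182820455354194518493101873649073345229357592820089788647309314207168155283158759887973374942900887112216809435726439719332489617595026127130188486605744772835304121328777049350151393485913797386817484346454998258538190625164316564190089063807984731155974301733079408620703823522506362759386757537825908227674441300157815323926677733108872081165410075004510313893771979423661570193459600430442986921887008615308703115759331468895019332117449890764155731485366478613673475367695393770922709150295149927054850312342795398250749691640727418684186250719259048877903750349861788269647713050627291484990904979153227351793448789524739355716847695582064875637666931),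
  -- class="info-grid"
  (natToBytesF 17 11703070786429802557131804700776522148963, natToBytesF 23 3278697882522420432833191591282381886259035546716828787),
  -- class="info-item"
  (natToBytesF 17 11715013109927708193009294365415318842467, natToBytesF 149 8993961579812487465846517403356711223482926815472247766040575900177696337411993046983736787092632637585717207177122198115406816228741887984440270687607994032624448942598139323864273314082352678840430818098392809063988151630700382799205168049400311720342314383148716507324443674302960709520489222941686896912707072459260002072125613488344154725205210268529779),
  -- class="info-label"
  (natToBytesF 18 2998702980155940587561206537311288306003043, natToBytesF 161 712575049702126521219077747907741231451723710549758610204617668310992849470150348606020926079984531983915452576239422766584941931673925018080204952640230478259891684444784974542236389659780392844867193552105583203837641977735718448558031896967383235203812544313209248016173585681286304116376010336865612308039324598555305044024761665543205417728353837345602241318345998734374488933758067),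
  -- class="info-value"
  (natToBytesF 18 2996342323159187443944348304653129145740387, natToBytesF 91 188811814294379039602012053649789504639244280340028927971208525009347203484306013007238885406960729590263570098538470049893493878380076576658942753203284199691297545174896541115621286679029744383176974092004797103830131),
  -- class="warning"
  (natToBytesF 15 178635929106684849597393852398922851, natToBytesF 247 915065724449049190377687789614307300358499530075043799059922475578934708194193996919341725945834870836522784555688958998578230735129610394869008551642838811206475422701780963345810870365857356783853297709611160905644677591018109925204633126529905496938914284256030232339336781459907626056546505964213202081444468967705964358256978057908583296881961636091351165858261146039563236036263352988370492361895977599745140282227735095698368314580794838629860559566778331050730905332570183583532735647415020241376030567354303314553632403915945968518671112253130143448406738268339909599181626511980065907),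
  -- class="terminal-container"
  (natToBytesF 26 55353970190768228080875366935165624147316676588388273480625251, natToBytesF 23 3278697882522420432833191591282381886259035546716828787),
  -- class="terminal"
  (natToBytesF 16 45756496058866571010566735830334925923, natToBytesF 136 443434557147766627778611372927902843214911650326513775202750131874660860238715396836499274093089082714108588906195219290421488141230057473803476060716782289157357326183903837155921400015227527428648479103858287602117112629032088620479751901053608195990622651271776323528604319808056162847195248942136416747663481206649443153011),
  -- class="terminal-header"
  (natToBytesF 23 3299353672860332473235776786076010632982932434528070755, natToBytesF 88 11253834262235953709629122372306010990251302396876527598706737618413447727272298364120016033617601373142408643787572283566591536607593553601326955352629925253543289427123549326888167453555902284013399297215788147),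
  -- class="terminal-body"
  (natToBytesF 21 50384083329912025251323496133670508073393754041443, natToBytesF 110 1077902205795538827527328088759420902414770872436670702521723445123871187280505524088969684032359269965210735966494183116151420736580571529188168596946564350227231420093496797743587370692133563178209518742800781955172997816495126883633884336672747910138861360608371),
  -- class="prompt"
  (natToBytesF 14 698827187996119474728515890408547, natToBytesF 42 18718492299889746135500247304747146613014014734965174562795519597584107817082900070242838809243382899),
  -- class="command"
  (natToBytesF 15 178575079400761535176597634621205603, natToBytesF 41 73117408064654334456597072611139515034584563563527586849237769821425923670328802426802941986436211),
  -- class="output"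
  (natToBytesF 14 698828739071613140886722355227747, natToBytesF 23 3278698257708936443315505304866365169204716322449618035),
  -- class="feature-grid"
  (natToBytesF 20 196344946447222464467174533087974663862291098723, natToBytesF 23 3278697882522420432833191591282381886259035546716828787),
  -- class="feature-item"
  (natToBytesF 20 196545305388088702867908526729387317969293503587, natToBytesF 149 8993700043169672307462257623976433652006269964841605399579859441174579943918819408639047504424534094575732046489956124496186888398616563173303280061388020147440777305829534847929213718146896717550989741423319258450335180977919155606103390975960856888229192993114936912082269249270579668089803355889311243711887431220431427606392650748667723290212740422530163)]

def pairsLit : List (List Char × List Char) :=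
  pairsN.map (fun p => (p.1.map Char.ofNat, p.2.map Char.ofNat))

def stylesList : List (String × String) :=
  pairsLit.map (fun p => (String.ofList p.1, String.ofList p.2))

def stylesMapA : PySem.Dict String String := PySem.Dict.mk stylesList

-- for class_name, inline_style in styles_map.items(): content = content.replace(class_name, inline_style)
def inline_styles_py (content : String) : String :=
  (stylesMapA.items).foldl (fun c p => PySem.Str.replace c p.1 p.2) content

-- ===== PORT B =====
def natToBytesB : Nat → Nat → List Nat
  | 0, _ => []
  | f+1, n => natToBytesB f (n / 256) ++ [n % 256]

-- _STYLES_BY_NAME = { '<class name>': 'style="…"', … }  (names as ASCII code lists)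
def bTable : List (List Nat × List Nat) := [
  -- status-indicator
  ([115, 116, 97, 116, 117, 115, 45, 105, 110, 100, 105, 99, 97, 116, 111, 114], natToBytesB 291 28314089625627878798900956675064215379978409576913872776887291067349420489067541280484848766468680631399173011638849045098344410406656873320876101807140522711046615225384965235931091051245738852082978274766863671437712327742303854620028926425522871710261377224503056542673341968623191032930983394151286727946809745376185334626904520690523746417250731241302547275902031108119644453351435854665839031412160809447473544732801721244211162664082449386781608853022768030198056703429001558919423697994463550578706265049927858120173088004793346938123881252659710955267382208228026571973952685046485574587262749633934888877859831039136828593915107648623531726249455017848685232739163508752269272883146467588898),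
  -- message-box
  ([109, 101, 115, 115, 97, 103, 101, 45, 98, 111, 120], natToBytesB 184 58928625867745537784246167477029721131956634371245222636444703924453919891913203970825278448382720966540893456480184079342082203882849612055291040979567908473144559232159051144298983522084072695356670370868752641837922581076398233642441919594582649928723133876802747068043265106326941092599962403208478495770137741279872545620255355819179115162845219640600655762441529599764310494581243205187938362927466160785582253849206291450790164122123042),
  -- btn-container
  ([98, 116, 110, 45, 99, 111, 110, 116, 97, 105, 110, 101, 114], natToBytesB 48 17770147459646537322149029544475856547979879959086636819278481603505884508172080322132987556111109064068119488117538),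
  -- btn
  ([98, 116, 110], natToBytesB 318 2981821664983792333805069749661922283764849979923282650609704445189049390939737490976381093538320354578144452492541240993290930413121465783516047644154741319360195680427590727353591643694988398644361914739539665256610547000829810895178169212583464129500028963394528170531984634642180298042331781727006602634077150394762966415488970308366164283074395325583558307160567672278374517449849003788550376786897237677300605508320385633043924235897376769786624084072047156225444683502525997874898602490543071995879011188940443929184289750357162831209584473404777174193482796978245857576614429915944384346866784785832835876217398240405386915875912113638618946178969481998498161487191547215826354535859117754163093717563265099272618053621679610600470769253383915462646326442786),
  -- info-grid
  ([105, 110, 102, 111, 45, 103, 114, 105, 100], natToBytesB 23 11058389913122575780223097493386242877088568579802020642),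
  -- info-item
  ([105, 110, 102, 111, 45, 105, 116, 101, 109], natToBytesB 149 30333849532243555435447861983306141124451863398189506919708563165242428671496521453614382762079190754020031794687464799234325314662152941011451561563650357248515716174849705268244075565495147366760032322968158664275228681309547045784130231666930609127855403427693470344996219211844977768137288550499653339655960440718507467631091292329582620675831098353662754),
  -- info-label
  ([105, 110, 102, 111, 45, 108, 97, 98, 101, 108], natToBytesB 161 2403295160423833670161824704348172466613628643807684238253011479833147014056773743276260911561520657301223806796989514825351197059260583067269697262411476374732542949961670572624472557062057946501022817550260461899429044854366681929643491310686204290043767582201034034001552345860694055543066302570258148220184841721244119688826100010927339310835692416754084770677840427984491029915515682),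
  -- info-value
  ([105, 110, 102, 111, 45, 118, 97, 108, 117, 101], natToBytesB 91 636809509447481537683179564869181833861990813448500815229896426876396565305513877529074183902332511037647573650149045608745752092157312184025731507606041702678496404853754453285816863507336084596700961761601546851990306),
  -- warning
  ([119, 97, 114, 110, 105, 110, 103], natToBytesB 247 3086342567227262026104705709101609202152695370586327384072551623365848832215058357763720874744378343412098625350475144712640852239922352411024413748732253125804815026083446610445155854604941548960947295768918349218171344072737888689033456053452415559114305555407093595365362154939865601487467888992453163968846299259172625410694690439951487083536376461529576027105167803938410552041536317563325667864994359404421743440462348396799548036890044119937609250722208476080757567950143644935811996582411033005885584543587944714498435426083249107419439600066632160171690971523303506152940261200427039522),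
  -- terminal-container
  ([116, 101, 114, 109, 105, 110, 97, 108, 45, 99, 111, 110, 116, 97, 105, 110, 101, 114], natToBytesB 23 11058389913122575780223097493386242877088568579802020642),
  -- terminal
  ([116, 101, 114, 109, 105, 110, 97, 108], natToBytesB 136 1495574250052726041964620982392901599402912169457163746333715817667562161662964631080911474889399136571762052823206546565018709412367293737901284213188093126733621412049211791653978744426408484597274949188766856057847993422729506127911930249725279534074513962986524231858745113349323314780006232264974946940607073540849884085026),
  -- terminal-header
  ([116, 101, 114, 109, 105, 110, 97, 108, 45, 104, 101, 97, 100, 101, 114], natToBytesB 88 37956804600207897281792040188232798698938125928434796652751564259469960948056877612026190103408597924642828356987372997922701372584098223518170645037460027728973287493719446428535086487950434963668723091413351202),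
  -- terminal-body
  ([116, 101, 114, 109, 105, 110, 97, 108, 45, 98, 111, 100, 121], natToBytesB 110 3635539612208528747326017376643388780057357189533544340059300975964368552731792548137801433858017564725017387062897017016649576264976510819364961188325478621815353775453111906616946522709209270777714766030209126847094722438911315161603106811633686634449267403864866),
  -- prompt
  ([112, 114, 111, 109, 112, 116], natToBytesB 42 63132245954188225617259516348300988723657369639853916073316257733727052155189529869314117397509323554),
  -- command
  ([99, 111, 109, 109, 97, 110, 100], natToBytesB 41 246610335758547756317419985735550737205314453949759999475722835033199060394874770717478322944621346),
  -- output
  ([111, 117, 116, 112, 117, 116], natToBytesB 23 11058389913122575767003388633646628161983245939886799650),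
  -- feature-grid
  ([102, 101, 97, 116, 117, 114, 101, 45, 103, 114, 105, 100], natToBytesB 23 11058389913122575780223097493386242877088568579802020642),
  -- feature-item
  ([102, 101, 97, 116, 117, 114, 101, 45, 105, 116, 101, 109], natToBytesB 149 30333849532243555435447861983306141124451863398189506919708563165242428671496521453614382762079190754018154915480263624176832525238275626796123621669847551067982732849318310246113848902231145241573683695718419530556554070645086087190161556703992892705294563685211333679254939415349440957474516686276604655813540906522581336864199993009751849007774842815462178)]

def bTableLit : List (List Char × List Char) :=
  bTable.map (fun p => (p.1.map Char.ofNat, p.2.map Char.ofNat))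

-- _ATTR = 'class="'
def bAttr : List Char := ['c', 'l', 'a', 's', 's', '=', '"']

-- _STYLES_BY_NAME.get(name): first matching key of the dict
def bLookup : List (List Char × List Char) → List Char → Option (List Char)
  | [], _ => none
  | p :: tl, n => if p.1 = n then some p.2 else bLookup tl n

-- the 'while i < n' scan of Source B; content.find('"', i + 7) is rendered with takeWhile:
-- the closing quote exists (find ≠ -1) iff the quote-free prefix of the rest is shorter
-- than the rest, and the name is exactly that prefix. (c :: t).drop 7 = t.drop 6.
def pvScanB : List Char → List Char
  | [] => []
  | c :: t =>
    if bAttr.isPrefixOf (c :: t) then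
      let name := (t.drop 6).takeWhile (fun x => x != '"')
      if name.length < (t.drop 6).length then
        match bLookup bTableLit name with
        | some v => v ++ pvScanB ((t.drop 6).drop (name.length + 1))
        | none => c :: pvScanB t
      else c :: pvScanB t
    else c :: pvScanB t
termination_by s => s.length
decreasing_by
  all_goals (simp [List.length_drop]; try omega)

def inline_styles_py_alt (content : String) : String :=
  String.ofList (pvScanB content.toList)

-- ===== PRECONDITION & SPEC =====
def Spec_inline_styles_py (content : String) (out : String) : Prop := out = inline_styles_py_alt content
instance (content : String) (out : String) : Decidable (Spec_inline_styles_py content out) := by unfold Spec_inline_styles_py; infer_instance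

-- ===== CLAIM (what is proved, stated in full; the proofs are below) =====
def Claim_equal_inline_styles_py : Prop := ∀ (content : String), Dom_inline_styles_py content → Spec_inline_styles_py content (inline_styles_py content)

-- ===== LEMMAS AND PROOFS =====

-- a reference scan: at each position replace by the FIRST matching full-attribute key of
-- A's table; the proof shows A's 18-pass fold equals this scan, and B's name-keyed scan too
def pvFindRep (ps : List (List Char × List Char)) (s : List Char) :
    Option (List Char × List Char) :=
  match ps with
  | [] => none
  | p :: tl => if p.1.isPrefixOf s then some p else pvFindRep tl s

def pvScan : List Char → List Char
  | [] => []
  | c :: t =>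
    match pvFindRep pairsLit (c :: t) with
    | some p => p.2 ++ pvScan (t.drop (p.1.length - 1))
    | none => c :: pvScan t
termination_by s => s.length
decreasing_by
  all_goals simp

-- the common prefix 'class="' of every table key
def pvPn : List Nat := [99, 108, 97, 115, 115, 61, 34]
def pvP : List Char := pvPn.map Char.ofNat

-- ---- decidable facts about the byte tables ----
set_option maxRecDepth 1000000 in
lemma hNV : ∀ p ∈ pairsN, (∀ x ∈ p.1, x < 128) ∧ (∀ x ∈ p.2, x < 128) := by decide

set_option maxRecDepth 1000000 in
lemma hN0 : ∀ p ∈ pairsN, p.1 ≠ [] ∧ p.2 ≠ [] := by decide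

set_option maxRecDepth 1000000 in
lemma hN1 : ∀ p ∈ pairsN, pvPn <+: p.1 := by decide

set_option maxRecDepth 1000000 in
lemma hN2 : ∀ p ∈ pairsN, ∀ q ∈ pairsN, p.1 <+: q.1 → p = q := by decide

set_option maxRecDepth 1000000 in
lemma hN3 : ∀ p ∈ pairsN, ∀ u ∈ p.1.tails, u ≠ [] → u.length < p.1.length →
    ¬(u <+: pvPn ∨ pvPn <+: u) := by decide

set_option maxRecDepth 1000000 in
lemma hN4 : ∀ p ∈ pairsN, ∀ u ∈ p.2.tails, u ≠ [] → ¬(u <+: pvPn ∨ pvPn <+: u) := by decide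

set_option maxRecDepth 1000000 in
lemma hN6 : ∀ p ∈ pairsN, ∀ u ∈ p.1.tails, u ≠ [] → u.length < p.1.length →
    ∀ q ∈ pairsN, ¬(u <+: q.2 ∨ q.2 <+: u) := by decide

set_option maxRecDepth 1000000 in
lemma hN7 : pairsN.Nodup := by decide

-- A's keys are exactly 'class="' ++ name ++ '"' over B's (name, value) table
set_option maxRecDepth 1000000 in
lemma hTblN : pairsN = bTable.map (fun p => (pvPn ++ p.1 ++ [34], p.2)) := by decide

set_option maxRecDepth 1000000 in
lemma hBQ : ∀ p ∈ bTable, 34 ∉ p.1 ∧ ∀ x ∈ p.1, x < 128 := by decide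

lemma hPV : ∀ x ∈ pvPn, x < 128 := by decide

-- ---- byte-to-character transfer ----
lemma rt {a : List Nat} (ha : ∀ x ∈ a, x < 128) :
    (a.map Char.ofNat).map Char.toNat = a := by
  rw [List.map_map]
  have : ∀ x ∈ a, (Char.toNat ∘ Char.ofNat) x = id x := by
    intro x hx
    have : Nat.isValidChar x := Or.inl (by have := ha x hx; omega)
    simp [Char.toNat_ofNat, this]
  rw [List.map_congr_left this, List.map_id]

lemma map_ofNat_prefix_of {a b : List Nat} (ha : ∀ x ∈ a, x < 128) (hb : ∀ x ∈ b, x < 128)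
    (h : a.map Char.ofNat <+: b.map Char.ofNat) : a <+: b := by
  have h2 := h.map Char.toNat
  rwa [rt ha, rt hb] at h2

lemma map_ofNat_inj {a b : List Nat} (ha : ∀ x ∈ a, x < 128) (hb : ∀ x ∈ b, x < 128)
    (h : a.map Char.ofNat = b.map Char.ofNat) : a = b := by
  have h2 := congrArg (List.map Char.toNat) h
  rwa [rt ha, rt hb] at h2

lemma mem_drop_sub {l u : List Nat} {d : Nat} (h : u = l.drop d) : u ∈ l.tails :=
  (List.mem_tails _ _).mpr (h ▸ List.drop_suffix d l)

-- character-level facts about the table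
lemma hC0 : ∀ p ∈ pairsLit, p.1 ≠ [] ∧ p.2 ≠ [] := by
  intro p hp
  obtain ⟨q, hq, rfl⟩ := List.mem_map.mp hp
  obtain ⟨h1, h2⟩ := hN0 q hq
  constructor <;> simpa

lemma hC1 : ∀ p ∈ pairsLit, pvP <+: p.1 := by
  intro p hp
  obtain ⟨q, hq, rfl⟩ := List.mem_map.mp hp
  exact (hN1 q hq).map Char.ofNat

lemma hC2 : ∀ p ∈ pairsLit, ∀ q ∈ pairsLit, p.1 <+: q.1 → p = q := by
  intro p hp q hq h
  obtain ⟨a, ha, rfl⟩ := List.mem_map.mp hp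
  obtain ⟨b, hb, rfl⟩ := List.mem_map.mp hq
  have := hN2 a ha b hb (map_ofNat_prefix_of (hNV a ha).1 (hNV b hb).1 h)
  rw [this]

lemma hC3 : ∀ p ∈ pairsLit, ∀ d : Nat, 0 < d → d < p.1.length →
    ¬(p.1.drop d <+: pvP ∨ pvP <+: p.1.drop d) := by
  intro p hp d hd hdl hor
  obtain ⟨q, hq, rfl⟩ := List.mem_map.mp hp
  simp only [List.length_map] at hdl
  have hdrop : (q.1.map Char.ofNat).drop d = (q.1.drop d).map Char.ofNat := by
    rw [List.map_drop]
  have hval : ∀ x ∈ q.1.drop d, x < 128 := fun x hx => (hNV q hq).1 x (List.mem_of_mem_drop hx)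
  apply hN3 q hq (q.1.drop d) (mem_drop_sub rfl)
    (by intro hnil; rw [List.eq_nil_iff_length_eq_zero, List.length_drop] at hnil; omega)
    (by rw [List.length_drop]; omega)
  rcases hor with h | h
  · exact Or.inl (map_ofNat_prefix_of hval hPV (by rwa [hdrop] at h))
  · exact Or.inr (map_ofNat_prefix_of hPV hval (by rwa [hdrop] at h))

lemma hC4 : ∀ p ∈ pairsLit, ∀ d : Nat, d < p.2.length →
    ¬(p.2.drop d <+: pvP ∨ pvP <+: p.2.drop d) := by
  intro p hp d hdl hor
  obtain ⟨q, hq, rfl⟩ := List.mem_map.mp hp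
  simp only [List.length_map] at hdl
  have hdrop : (q.2.map Char.ofNat).drop d = (q.2.drop d).map Char.ofNat := by
    rw [List.map_drop]
  have hval : ∀ x ∈ q.2.drop d, x < 128 := fun x hx => (hNV q hq).2 x (List.mem_of_mem_drop hx)
  apply hN4 q hq (q.2.drop d) (mem_drop_sub rfl)
    (by intro hnil; rw [List.eq_nil_iff_length_eq_zero, List.length_drop] at hnil; omega)
  rcases hor with h | h
  · exact Or.inl (map_ofNat_prefix_of hval hPV (by rwa [hdrop] at h))
  · exact Or.inr (map_ofNat_prefix_of hPV hval (by rwa [hdrop] at h))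

lemma hC6 : ∀ p ∈ pairsLit, ∀ d : Nat, 0 < d → d < p.1.length → ∀ q ∈ pairsLit,
    ¬(p.1.drop d <+: q.2 ∨ q.2 <+: p.1.drop d) := by
  intro p hp d hd hdl q hq hor
  obtain ⟨a, ha, rfl⟩ := List.mem_map.mp hp
  obtain ⟨b, hb, rfl⟩ := List.mem_map.mp hq
  simp only [List.length_map] at hdl
  have hdrop : (a.1.map Char.ofNat).drop d = (a.1.drop d).map Char.ofNat := by
    rw [List.map_drop]
  have hval : ∀ x ∈ a.1.drop d, x < 128 := fun x hx => (hNV a ha).1 x (List.mem_of_mem_drop hx)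
  apply hN6 a ha (a.1.drop d) (mem_drop_sub rfl)
    (by intro hnil; rw [List.eq_nil_iff_length_eq_zero, List.length_drop] at hnil; omega)
    (by rw [List.length_drop]; omega) b hb
  rcases hor with h | h
  · exact Or.inl (map_ofNat_prefix_of hval (hNV b hb).2 (by rwa [hdrop] at h))
  · exact Or.inr (map_ofNat_prefix_of (hNV b hb).2 hval (by rwa [hdrop] at h))

lemma hC7 : pairsLit.Nodup := by
  apply hN7.map_on
  intro x hx y hy hxy
  have h1 := congrArg Prod.fst hxy
  have h2 := congrArg Prod.snd hxy
  simp only at h1 h2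
  exact Prod.ext (map_ofNat_inj (hNV x hx).1 (hNV y hy).1 h1)
    (map_ofNat_inj (hNV x hx).2 (hNV y hy).2 h2)

-- ---- generic prefix helpers ----
lemma prefix_drop {a b : List Char} (n : Nat) (h : a <+: b) (hn : n ≤ a.length) :
    a.drop n <+: b.drop n := by
  obtain ⟨t, rfl⟩ := h
  rw [List.drop_append_of_le_length hn]
  exact ⟨t, rfl⟩

lemma prefix_of_prefix_append {a b c : List Char} (h : a <+: b ++ c) (hl : a.length ≤ b.length) :
    a <+: b := by
  have ha : a = (b ++ c).take a.length := List.prefix_iff_eq_take.mp h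
  rw [List.take_append_of_le_length hl] at ha
  rw [ha]
  exact List.take_prefix _ _

lemma shield {u k z : List Char} (h1 : ¬ u <+: pvP) (h2 : ¬ pvP <+: u) (hk : pvP <+: k) :
    ¬ k <+: u ++ z := by
  intro h
  rcases List.prefix_or_prefix_of_prefix h (List.prefix_append u z) with h' | h'
  · exact h2 (hk.trans h')
  · rcases List.prefix_or_prefix_of_prefix h' hk with h'' | h''
    · exact h1 h''
    · exact h2 h''

-- ---- structural form of Python str.replace (nonempty pattern) ----
def replA (k v : List Char) : List Char → List Char
  | [] => []
  | c :: t =>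
    if k.isPrefixOf (c :: t) then v ++ replA k v (t.drop (k.length - 1))
    else c :: replA k v t
termination_by s => s.length
decreasing_by
  all_goals simp

def foldR (ps : List (List Char × List Char)) (s : List Char) : List Char :=
  ps.foldl (fun c p => replA p.1 p.2 c) s

lemma go_eq (k v : List Char) (hk : k ≠ []) :
    ∀ (fuel : Nat) (l acc : List Char), l.length ≤ fuel →
      PySem.Chars.replace.go k v fuel l acc = acc.reverse ++ replA k v l := by
  intro fuel
  induction fuel with
  | zero =>
    intro l acc h
    have hl : l = [] := List.eq_nil_of_length_eq_zero (by omega)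
    subst hl
    simp [PySem.Chars.replace.go, replA]
  | succ n ih =>
    intro l acc h
    cases l with
    | nil => simp [PySem.Chars.replace.go, replA]
    | cons c t =>
      rw [PySem.Chars.replace.go]
      split
      · rename_i hpre
        have hk1 : 1 ≤ k.length := List.length_pos_iff.mpr hk
        rw [ih _ _ (by simp at h ⊢; omega)]
        rw [replA, if_pos hpre]
        have hlen : k.length = (k.length - 1) + 1 := by omega
        rw [hlen, List.drop_succ_cons]
        simp
      · rename_i hpre
        rw [ih _ _ (by simp at h ⊢; omega)]
        rw [replA, if_neg hpre]
        simp

lemma replace_eq_replA (k v s : List Char) (hk : k ≠ []) :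
    PySem.Chars.replace s k v = replA k v s := by
  rw [PySem.Chars.replace, if_neg (by simp [hk])]
  simpa using go_eq k v hk s.length s [] le_rfl

lemma replA_append (k v : List Char) :
    ∀ (w z : List Char), (∀ q < w.length, ¬ k <+: (w ++ z).drop q) →
      replA k v (w ++ z) = w ++ replA k v z := by
  intro w
  induction w with
  | nil => intro z _; simp
  | cons c w' ih =>
    intro z h
    rw [List.cons_append, replA, if_neg]
    · rw [ih z (fun q hq => by simpa using h (q + 1) (by simpa using hq))]
      simp
    · intro hpre
      exact h 0 (by simp) (by simpa using List.isPrefixOf_iff_prefix.mp hpre)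

lemma replA_head (k v z : List Char) (hk : k ≠ []) :
    replA k v (k ++ z) = v ++ replA k v z := by
  obtain ⟨c, k', rfl⟩ := List.exists_cons_of_ne_nil hk
  rw [List.cons_append, replA, if_pos]
  · have hlen : (c :: k').length - 1 = k'.length := by simp
    rw [hlen, List.drop_left]
  · exact List.isPrefixOf_iff_prefix.mpr ⟨z, by simp⟩

lemma replA_id (k v : List Char) :
    ∀ s : List Char, (∀ q, ¬ k <+: s.drop q) → replA k v s = s := by
  intro s
  induction s with
  | nil => intro _; rw [replA]
  | cons c t ih =>
    intro h
    rw [replA, if_neg]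
    · rw [ih (fun q => by simpa using h (q + 1))]
    · intro hpre
      exact h 0 (by simpa using List.isPrefixOf_iff_prefix.mp hpre)

lemma foldR_nil : ∀ ps : List (List Char × List Char), foldR ps [] = [] := by
  intro ps
  induction ps with
  | nil => rfl
  | cons a tl ih =>
    show foldR tl (replA a.1 a.2 []) = []
    rw [replA]
    exact ih

lemma foldR_noMatch (s : List Char) :
    ∀ ps : List (List Char × List Char), (∀ p ∈ ps, ∀ q, ¬ p.1 <+: s.drop q) →
    foldR ps s = s := by
  intro ps
  induction ps with
  | nil => intro _; rfl
  | cons a tl ih =>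
    intro h
    show foldR tl (replA a.1 a.2 s) = s
    rw [replA_id a.1 a.2 s (h a List.mem_cons_self)]
    exact ih (fun p hp => h p (List.mem_cons_of_mem a hp))

-- ---- pvFindRep / pvScan facts ----
lemma pvFindRep_none (ps : List (List Char × List Char)) (s : List Char)
    (h : ∀ p ∈ ps, ¬ p.1 <+: s) : pvFindRep ps s = none := by
  induction ps with
  | nil => rfl
  | cons a tl ih =>
    rw [pvFindRep, if_neg]
    · exact ih (fun p hp => h p (List.mem_cons_of_mem a hp))
    · intro hpre
      exact h a List.mem_cons_self (List.isPrefixOf_iff_prefix.mp hpre)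

lemma pvFindRep_some (s : List Char) (p : List Char × List Char) :
    ∀ ps : List (List Char × List Char), p ∈ ps → p.1 <+: s →
      (∀ q ∈ ps, q.1 <+: s → q = p) → pvFindRep ps s = some p := by
  intro ps
  induction ps with
  | nil => intro h; cases h
  | cons a tl ih =>
    intro hmem hpre huniq
    by_cases ha : a.1 <+: s
    · have : a = p := huniq a List.mem_cons_self ha
      subst this
      rw [pvFindRep, if_pos (List.isPrefixOf_iff_prefix.mpr ha)]
    · rw [pvFindRep, if_neg (fun hc => ha (List.isPrefixOf_iff_prefix.mp hc))]
      have hmem' : p ∈ tl := by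
        cases List.mem_cons.mp hmem with
        | inl h => exact absurd (h ▸ hpre) ha
        | inr h => exact h
      exact ih hmem' hpre (fun q hq => huniq q (List.mem_cons_of_mem a hq))

lemma pvScan_id : ∀ s : List Char, (∀ q, ∀ p ∈ pairsLit, ¬ p.1 <+: s.drop q) → pvScan s = s := by
  intro s
  induction s with
  | nil => intro _; rw [pvScan]
  | cons c t ih =>
    intro h
    rw [pvScan, pvFindRep_none _ _ (fun p hp => by simpa using h 0 p hp)]
    rw [ih (fun q p hp => by simpa using h (q + 1) p hp)]

lemma pvScan_append : ∀ (x z : List Char),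
    (∀ q < x.length, ∀ p ∈ pairsLit, ¬ p.1 <+: (x ++ z).drop q) →
    pvScan (x ++ z) = x ++ pvScan z := by
  intro x
  induction x with
  | nil => intro z _; simp
  | cons c x' ih =>
    intro z h
    rw [List.cons_append, pvScan,
      pvFindRep_none _ _ (fun p hp => by simpa using h 0 (by simp) p hp)]
    rw [ih z (fun q hq p hp => by simpa using h (q + 1) (by simpa using hq) p hp)]
    simp

lemma pvScan_head (p : List Char × List Char) (hp : p ∈ pairsLit) (r : List Char) :
    pvScan (p.1 ++ r) = p.2 ++ pvScan r := by
  have hk : p.1 ≠ [] := (hC0 p hp).1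
  obtain ⟨c, k', hck⟩ := List.exists_cons_of_ne_nil hk
  have huniq : ∀ q ∈ pairsLit, q.1 <+: p.1 ++ r → q = p := by
    intro q hq hqpre
    rcases List.prefix_or_prefix_of_prefix hqpre (List.prefix_append p.1 r) with h' | h'
    · exact hC2 q hq p hp h'
    · exact (hC2 p hp q hq h').symm
  have hsome : pvFindRep pairsLit (c :: (k' ++ r)) = some p :=
    pvFindRep_some _ p pairsLit hp (by rw [hck]; exact ⟨r, by simp⟩)
      (fun q hq hpre => huniq q hq (by simpa [hck] using hpre))
  rw [hck, List.cons_append, pvScan, hsome]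
  show p.2 ++ pvScan (List.drop (p.1.length - 1) (k' ++ r)) = p.2 ++ pvScan r
  have hlen : p.1.length - 1 = k'.length := by simp [hck]
  rw [hlen, List.drop_left]

-- ---- fold pass-through ----
lemma foldR_passthrough (w : List Char) :
    ∀ L' : List (List Char × List Char),
      (∀ j ∈ L', ∀ z : List Char, ∀ q < w.length, ¬ j.1 <+: (w ++ z).drop q) →
      ∀ z, foldR L' (w ++ z) = w ++ foldR L' z := by
  intro L'
  induction L' with
  | nil => intro _ z; simp [foldR]
  | cons a tl ih =>
    intro h z
    show foldR tl (replA a.1 a.2 (w ++ z)) = w ++ foldR tl (replA a.1 a.2 z)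
    rw [replA_append a.1 a.2 w z (fun q hq => h a List.mem_cons_self z q hq)]
    exact ih (fun j hj => h j (List.mem_cons_of_mem a hj)) (replA a.1 a.2 z)

-- ---- region lemmas (no key matches over the stated region, whatever the tail) ----
lemma match_free_i (pi : List Char × List Char) (hpi : pi ∈ pairsLit) (x r : List Char)
    (hmin : ∀ q < x.length, ∀ p ∈ pairsLit, ¬ p.1 <+: (x ++ (pi.1 ++ r)).drop q) :
    ∀ z : List Char, ∀ q < x.length, ¬ pi.1 <+: (x ++ (pi.1 ++ z)).drop q := by
  intro z q hq h
  rw [List.drop_append_of_le_length (le_of_lt hq)] at h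
  rw [show List.drop q x ++ (pi.1 ++ z) = (List.drop q x ++ pi.1) ++ z from by simp] at h
  rcases List.prefix_or_prefix_of_prefix h (List.prefix_append _ z) with h' | h'
  · refine hmin q hq pi hpi ?_
    rw [List.drop_append_of_le_length (le_of_lt hq)]
    exact h'.trans (by rw [show List.drop q x ++ (pi.1 ++ r) = (List.drop q x ++ pi.1) ++ r from by simp]; exact List.prefix_append _ r)
  · have hle := h'.length_le
    rw [List.length_append, List.length_drop] at hle
    omega

lemma match_free_key (pi : List Char × List Char) (hpi : pi ∈ pairsLit) (x r : List Char)
    (hmin : ∀ q < x.length, ∀ p ∈ pairsLit, ¬ p.1 <+: (x ++ (pi.1 ++ r)).drop q) :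
    ∀ j ∈ pairsLit, j ≠ pi → ∀ z : List Char, ∀ q, q < x.length + pi.1.length →
      ¬ j.1 <+: (x ++ (pi.1 ++ z)).drop q := by
  intro j hj hne z q hq h
  rcases lt_trichotomy q x.length with hqx | hqx | hqx
  · rw [List.drop_append_of_le_length (le_of_lt hqx)] at h
    rw [show List.drop q x ++ (pi.1 ++ z) = (List.drop q x ++ pi.1) ++ z from by simp] at h
    rcases List.prefix_or_prefix_of_prefix h (List.prefix_append _ z) with h' | h'
    · refine hmin q hqx j hj ?_
      rw [List.drop_append_of_le_length (le_of_lt hqx)]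
      exact h'.trans (by rw [show List.drop q x ++ (pi.1 ++ r) = (List.drop q x ++ pi.1) ++ r from by simp]; exact List.prefix_append _ r)
    · have hdlen : (List.drop q x).length = x.length - q := List.length_drop
      have hprefdrop := prefix_drop (x.length - q) h' (by rw [List.length_append, hdlen]; omega)
      rw [show List.drop (x.length - q) (List.drop q x ++ pi.1) = pi.1 from by
            rw [List.drop_append_of_le_length (by omega), List.drop_eq_nil_of_le (by omega), List.nil_append]] at hprefdrop
      have hP : pvP <+: List.drop (x.length - q) j.1 := (hC1 pi hpi).trans hprefdrop
      have hpine : pi.1 ≠ [] := (hC0 pi hpi).1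
      have hlenu := h'.length_le
      rw [List.length_append, hdlen] at hlenu
      have hpilen : 1 ≤ pi.1.length := List.length_pos_iff.mpr hpine
      exact hC3 j hj (x.length - q) (by omega) (by omega) (Or.inr hP)
  · subst hqx
    rw [List.drop_append_of_le_length le_rfl, List.drop_eq_nil_of_le le_rfl, List.nil_append] at h
    rcases List.prefix_or_prefix_of_prefix h (List.prefix_append pi.1 z) with h' | h'
    · exact hne (hC2 j hj pi hpi h')
    · exact hne (hC2 pi hpi j hj h').symm
  · have hdrop : (x ++ (pi.1 ++ z)).drop q = pi.1.drop (q - x.length) ++ z := by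
      rw [show q = x.length + (q - x.length) from by omega, List.drop_append]
      simp [List.drop_append_of_le_length (show q - x.length ≤ pi.1.length from by omega)]
    rw [hdrop] at h
    exact shield (fun hc => hC3 pi hpi (q - x.length) (by omega) (by omega) (Or.inl hc))
      (fun hc => hC3 pi hpi (q - x.length) (by omega) (by omega) (Or.inr hc))
      (hC1 j hj) h

lemma match_free_val (pi : List Char × List Char) (hpi : pi ∈ pairsLit) (x r : List Char)
    (hmin : ∀ q < x.length, ∀ p ∈ pairsLit, ¬ p.1 <+: (x ++ (pi.1 ++ r)).drop q) :
    ∀ j ∈ pairsLit, ∀ z : List Char, ∀ q, q < x.length + pi.2.length →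
      ¬ j.1 <+: (x ++ (pi.2 ++ z)).drop q := by
  intro j hj z q hq h
  have hvne : pi.2 ≠ [] := (hC0 pi hpi).2
  have hvlen : 1 ≤ pi.2.length := List.length_pos_iff.mpr hvne
  have hjne : j.1 ≠ [] := (hC0 j hj).1
  rcases lt_trichotomy q x.length with hqx | hqx | hqx
  · rw [List.drop_append_of_le_length (le_of_lt hqx)] at h
    rw [show List.drop q x ++ (pi.2 ++ z) = (List.drop q x ++ pi.2) ++ z from by simp] at h
    have hdlen : (List.drop q x).length = x.length - q := List.length_drop
    rcases List.prefix_or_prefix_of_prefix h (List.prefix_append _ z) with h' | h'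
    · by_cases hsmall : j.1.length ≤ x.length - q
      · have hjx : j.1 <+: List.drop q x := prefix_of_prefix_append h' (by omega)
        refine hmin q hqx j hj ?_
        rw [List.drop_append_of_le_length (le_of_lt hqx)]
        exact hjx.trans (List.prefix_append _ _)
      · have hprefdrop := prefix_drop (x.length - q) h' (by omega)
        rw [show List.drop (x.length - q) (List.drop q x ++ pi.2) = pi.2 from by
              rw [List.drop_append_of_le_length (by omega), List.drop_eq_nil_of_le (by omega), List.nil_append]] at hprefdrop
        exact hC6 j hj (x.length - q) (by omega) (by omega) pi hpi (Or.inl hprefdrop)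
    · have hprefdrop := prefix_drop (x.length - q) h' (by rw [List.length_append, hdlen]; omega)
      rw [show List.drop (x.length - q) (List.drop q x ++ pi.2) = pi.2 from by
            rw [List.drop_append_of_le_length (by omega), List.drop_eq_nil_of_le (by omega), List.nil_append]] at hprefdrop
      have hlenu := h'.length_le
      rw [List.length_append, hdlen] at hlenu
      exact hC6 j hj (x.length - q) (by omega) (by omega) pi hpi (Or.inr hprefdrop)
  · subst hqx
    rw [List.drop_append_of_le_length le_rfl, List.drop_eq_nil_of_le le_rfl, List.nil_append] at h
    rcases List.prefix_or_prefix_of_prefix h (List.prefix_append pi.2 z) with h' | h'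
    · exact hC4 pi hpi 0 (by omega) (by simpa using Or.inr ((hC1 j hj).trans h'))
    · rcases List.prefix_or_prefix_of_prefix h' (hC1 j hj) with h'' | h''
      · exact hC4 pi hpi 0 (by omega) (by simpa using Or.inl h'')
      · exact hC4 pi hpi 0 (by omega) (by simpa using Or.inr h'')
  · have hdrop : (x ++ (pi.2 ++ z)).drop q = pi.2.drop (q - x.length) ++ z := by
      rw [show q = x.length + (q - x.length) from by omega, List.drop_append]
      simp [List.drop_append_of_le_length (show q - x.length ≤ pi.2.length from by omega)]
    rw [hdrop] at h
    exact shield (fun hc => hC4 pi hpi (q - x.length) (by omega) (Or.inl hc))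
      (fun hc => hC4 pi hpi (q - x.length) (by omega) (Or.inr hc))
      (hC1 j hj) h

-- ---- main equivalence: A's fold equals the reference scan ----
lemma main_eq : ∀ s : List Char, foldR pairsLit s = pvScan s := by
  have H : ∀ n, ∀ s : List Char, s.length ≤ n → foldR pairsLit s = pvScan s := by
    intro n
    induction n with
    | zero =>
      intro s hs
      have : s = [] := List.eq_nil_of_length_eq_zero (by omega)
      subst this
      rw [pvScan]
      exact foldR_nil pairsLit
    | succ n ih =>
      intro s hs
      by_cases hA : ∃ q, ∃ p ∈ pairsLit, p.1 <+: s.drop q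
      · set m := Nat.find hA with hmdef
        obtain ⟨pi, hpi, hpre⟩ := Nat.find_spec hA
        have hk1 : 1 ≤ pi.1.length := List.length_pos_iff.mpr (hC0 pi hpi).1
        have hmlt : m < s.length := by
          by_contra hge
          push Not at hge
          rw [List.drop_eq_nil_of_le hge] at hpre
          exact (hC0 pi hpi).1 (List.prefix_nil.mp hpre)
        obtain ⟨r, hr⟩ := hpre
        have hsdecomp : s = s.take m ++ (pi.1 ++ r) := by
          conv_lhs => rw [← List.take_append_drop m s]
          rw [hr]
        set x := s.take m with hx
        have hxlen : x.length = m := by rw [hx, List.length_take]; omega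
        have hmin : ∀ q < x.length, ∀ p ∈ pairsLit, ¬ p.1 <+: (x ++ (pi.1 ++ r)).drop q := by
          intro q hq p hp hcon
          have hex : ∃ p ∈ pairsLit, p.1 <+: s.drop q := ⟨p, hp, by rwa [← hsdecomp] at hcon⟩
          exact Nat.find_min hA (by omega) hex
        have hslen : s.length = x.length + (pi.1.length + r.length) := by
          rw [hsdecomp]; simp
        have hrlen : r.length ≤ n := by omega
        obtain ⟨L1, L2, hLL⟩ := List.append_of_mem hpi
        have hnodup : (L1 ++ pi :: L2).Nodup := hLL ▸ hC7
        have hsubL1 : ∀ j ∈ L1, j ∈ pairsLit := fun j hj => hLL ▸ List.mem_append_left _ hj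
        have hsubL2 : ∀ j ∈ L2, j ∈ pairsLit :=
          fun j hj => hLL ▸ List.mem_append_right _ (List.mem_cons_of_mem _ hj)
        have hneL1 : ∀ j ∈ L1, j ≠ pi := by
          intro j hj heq
          exact (List.disjoint_of_nodup_append hnodup) (heq ▸ hj) List.mem_cons_self
        have hneL2 : ∀ j ∈ L2, j ≠ pi := by
          intro j hj heq
          have := (List.nodup_append.mp hnodup).2.1
          rw [List.nodup_cons] at this
          exact this.1 (heq ▸ hj)
        have step1 : ∀ z, foldR L1 (x ++ (pi.1 ++ z)) = x ++ (pi.1 ++ foldR L1 z) := by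
          intro z
          have := foldR_passthrough (x ++ pi.1) L1
            (fun j hj z' q hq => by
              rw [show (x ++ pi.1) ++ z' = x ++ (pi.1 ++ z') from by simp]
              exact match_free_key pi hpi x r hmin j (hsubL1 j hj) (hneL1 j hj) z' q
                (by rw [List.length_append] at hq; omega)) z
          rw [show (x ++ pi.1) ++ z = x ++ (pi.1 ++ z) from by simp] at this
          rw [this]
          simp
        have step2 : ∀ z, replA pi.1 pi.2 (x ++ (pi.1 ++ z)) = x ++ (pi.2 ++ replA pi.1 pi.2 z) := by
          intro z
          rw [replA_append pi.1 pi.2 x (pi.1 ++ z) (fun q hq => match_free_i pi hpi x r hmin z q hq)]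
          rw [replA_head pi.1 pi.2 z (hC0 pi hpi).1]
        have step3 : ∀ z, foldR L2 (x ++ (pi.2 ++ z)) = x ++ (pi.2 ++ foldR L2 z) := by
          intro z
          have := foldR_passthrough (x ++ pi.2) L2
            (fun j hj z' q hq => by
              rw [show (x ++ pi.2) ++ z' = x ++ (pi.2 ++ z') from by simp]
              exact match_free_val pi hpi x r hmin j (hsubL2 j hj) z' q
                (by rw [List.length_append] at hq; omega)) z
          rw [show (x ++ pi.2) ++ z = x ++ (pi.2 ++ z) from by simp] at this
          rw [this]
          simp
        have hfold : foldR pairsLit s = x ++ (pi.2 ++ foldR pairsLit r) := by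
          rw [hLL, hsdecomp]
          rw [show foldR (L1 ++ pi :: L2) (x ++ (pi.1 ++ r))
              = foldR L2 (replA pi.1 pi.2 (foldR L1 (x ++ (pi.1 ++ r)))) from by
            simp [foldR, List.foldl_append]]
          rw [step1 r, step2 (foldR L1 r), step3 (replA pi.1 pi.2 (foldR L1 r))]
          rw [show foldR L2 (replA pi.1 pi.2 (foldR L1 r)) = foldR (L1 ++ pi :: L2) r from by
            simp [foldR, List.foldl_append]]
        have hscan : pvScan s = x ++ (pi.2 ++ pvScan r) := by
          rw [hsdecomp]
          rw [pvScan_append x (pi.1 ++ r) (fun q hq p hp => hmin q hq p hp)]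
          rw [pvScan_head pi hpi r]
        rw [hfold, hscan, ih r hrlen]
      · push Not at hA
        rw [pvScan_id s (fun q p hp => hA q p hp)]
        exact foldR_noMatch s pairsLit (fun p hp q => hA q p hp)
  intro s
  exact H s.length s le_rfl

-- ---- bridging A's String-level fold ----
lemma toList_foldA : ∀ (l : List (String × String)) (s : String),
    (l.foldl (fun c p => PySem.Str.replace c p.1 p.2) s).toList
      = (l.map (fun p => (p.1.toList, p.2.toList))).foldl
          (fun c p => PySem.Chars.replace c p.1 p.2) s.toList := by
  intro l
  induction l with
  | nil => intro s; rfl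
  | cons a tl ih =>
    intro s
    simp only [List.foldl_cons, List.map_cons]
    rw [ih, PySem.Str.toList_replace]

lemma stylesList_toList : stylesList.map (fun p => (p.1.toList, p.2.toList)) = pairsLit := by
  rw [stylesList, List.map_map]
  have : ∀ p ∈ pairsLit,
      ((fun p : String × String => (p.1.toList, p.2.toList)) ∘
        fun p : List Char × List Char => (String.ofList p.1, String.ofList p.2)) p = id p := by
    intro p _
    simp [String.toList_ofList]
  rw [List.map_congr_left this, List.map_id]

lemma foldC_eq_foldR : ∀ (ps : List (List Char × List Char)), (∀ p ∈ ps, p.1 ≠ []) →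
    ∀ s, ps.foldl (fun c p => PySem.Chars.replace c p.1 p.2) s = foldR ps s := by
  intro ps
  induction ps with
  | nil => intro _ s; rfl
  | cons a tl ih =>
    intro h s
    show (tl.foldl _ (PySem.Chars.replace s a.1 a.2)) = foldR tl (replA a.1 a.2 s)
    rw [replace_eq_replA a.1 a.2 s (h a List.mem_cons_self)]
    exact ih (fun p hp => h p (List.mem_cons_of_mem a hp)) _

-- ---- bridging B's name-keyed scan to the reference scan ----
lemma bAttr_eq : bAttr = pvP := by decide

lemma pvP_len : pvP.length = 7 := by decide

lemma hTblC : pairsLit = bTableLit.map (fun p => (pvP ++ p.1 ++ ['"'], p.2)) := by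
  rw [pairsLit, hTblN, bTableLit, List.map_map, List.map_map]
  apply List.map_congr_left
  intro p _
  simp only [Function.comp, List.map_append]
  rfl

lemma hBQC : ∀ p ∈ bTableLit, ∀ x ∈ p.1, x ≠ '"' := by
  intro p hp x hx hq
  obtain ⟨q, hq', rfl⟩ := List.mem_map.mp hp
  obtain ⟨y, hy, rfl⟩ := List.mem_map.mp hx
  have hlt : y < 128 := (hBQ q hq').2 y hy
  have hv : Nat.isValidChar y := Or.inl (by omega)
  have h34 := congrArg Char.toNat hq
  simp [Char.toNat_ofNat, hv] at h34
  have h34' : y = 34 := by simpa using h34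
  exact (hBQ q hq').1 (h34' ▸ hy)

-- a key of the shape n ++ ['"'], n quote-free, matching name ++ '"' :: r2 forces n = name
lemma qf_prefix : ∀ (a b r2 : List Char), (∀ x ∈ a, x ≠ '"') → (∀ x ∈ b, x ≠ '"') →
    a ++ ['"'] <+: b ++ '"' :: r2 → a = b := by
  intro a
  induction a with
  | nil =>
    intro b r2 _ hb h
    cases b with
    | nil => rfl
    | cons y b' =>
      rw [List.nil_append, List.cons_append, List.cons_prefix_cons] at h
      exact absurd h.1.symm (hb y List.mem_cons_self)
  | cons x a' ih =>
    intro b r2 ha hb h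
    cases b with
    | nil =>
      rw [List.cons_append, List.nil_append, List.cons_prefix_cons] at h
      exact absurd h.1 (ha x List.mem_cons_self)
    | cons y b' =>
      rw [List.cons_append, List.cons_append, List.cons_prefix_cons] at h
      rw [ih b' r2 (fun z hz => ha z (List.mem_cons_of_mem x hz))
        (fun z hz => hb z (List.mem_cons_of_mem y hz)) h.2, h.1]

-- every pair of A's table arises from a quote-free name in B's table
lemma key_shape : ∀ q ∈ pairsLit, ∃ nq, (nq, q.2) ∈ bTableLit ∧
    q.1 = pvP ++ nq ++ ['"'] ∧ ∀ x ∈ nq, x ≠ '"' := by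
  intro q hq
  rw [hTblC] at hq
  obtain ⟨p, hp, rfl⟩ := List.mem_map.mp hq
  exact ⟨p.1, hp, rfl, hBQC p hp⟩

lemma bLookup_mem : ∀ (t : List (List Char × List Char)) (n v : List Char),
    bLookup t n = some v → (n, v) ∈ t := by
  intro t
  induction t with
  | nil => intro n v h; cases h
  | cons p tl ih =>
    intro n v h
    rw [bLookup] at h
    split at h
    · rename_i he
      cases h
      exact he ▸ List.mem_cons_self
    · exact List.mem_cons_of_mem p (ih n v h)

lemma bLookup_none : ∀ (t : List (List Char × List Char)) (n : List Char),
    bLookup t n = none → ∀ v, (n, v) ∉ t := by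
  intro t
  induction t with
  | nil => intro n _ v h; cases h
  | cons p tl ih =>
    intro n h v hm
    rw [bLookup] at h
    split at h
    · cases h
    · rename_i hne
      cases List.mem_cons.mp hm with
      | inl he => exact hne (congrArg Prod.fst he.symm)
      | inr he => exact ih n h v he

lemma takeWhile_quotefree {r : List Char} :
    ∀ x ∈ r.takeWhile (fun x => x != '"'), x ≠ '"' := by
  intro x hx
  have := List.mem_takeWhile_imp hx
  simpa using this

lemma dropWhile_head_quote : ∀ (r : List Char) {d : List Char} {c : Char},
    r.dropWhile (fun x => x != '"') = c :: d → c = '"' := by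
  intro r
  induction r with
  | nil => intro d c h; cases h
  | cons a r' ih =>
    intro d c h
    rw [List.dropWhile_cons] at h
    by_cases ha : (a != '"') = true
    · rw [if_pos ha] at h
      exact ih h
    · rw [if_neg ha] at h
      cases h
      simpa using ha

-- the central step lemma: on pvP ++ r both scans take the same step
lemma scanB_eq : ∀ s : List Char, pvScanB s = pvScan s := by
  have H : ∀ N, ∀ s : List Char, s.length ≤ N → pvScanB s = pvScan s := by
    intro N
    induction N with
    | zero =>
      intro s hs
      have : s = [] := List.eq_nil_of_length_eq_zero (by omega)
      subst this
      rw [pvScanB, pvScan]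
    | succ N ih =>
      intro s hs
      cases s with
      | nil => rw [pvScanB, pvScan]
      | cons c t =>
        have hs' : t.length ≤ N := by simpa using hs
        by_cases hpre : pvP <+: c :: t
        · -- decompose c :: t = pvP ++ r with r = t.drop 6
          have hlen7 : 7 ≤ t.length + 1 := by
            have := hpre.length_le
            rw [pvP_len] at this
            simpa using this
          have hdecomp : c :: t = pvP ++ t.drop 6 := by
            conv_lhs => rw [← List.take_append_drop 7 (c :: t)]
            have : (c :: t).take 7 = pvP := (List.prefix_iff_eq_take.mp hpre).symm ▸ rfl
            rw [List.prefix_iff_eq_take.mp hpre]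
            rfl
          set r := t.drop 6 with hrdef
          set name := r.takeWhile (fun x => x != '"') with hname
          have hnq : ∀ x ∈ name, x ≠ '"' := takeWhile_quotefree
          have hrlen : r.length = t.length - 6 := by rw [hrdef, List.length_drop]
          by_cases hq : name.length < r.length
          · -- a closing quote exists: r = name ++ '"' :: r2
            have hsplit := List.takeWhile_append_dropWhile (p := fun x => x != '"') (l := r)
            have hdnn : r.dropWhile (fun x => x != '"') ≠ [] := by
              intro hnil
              rw [← hsplit, hnil, List.append_nil] at hq
              exact lt_irrefl _ (hname ▸ hq)
            obtain ⟨d, r2, hd⟩ := List.exists_cons_of_ne_nil hdnn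
            have hdq : d = '"' := dropWhile_head_quote r hd
            have hr : r = name ++ '"' :: r2 := by
              rw [← hsplit, hd, hdq, hname]
            have hr2len : r2.length < r.length := by
              rw [hr]; simp; omega
            -- both recursion arguments coincide
            have hdropr : r.drop (name.length + 1) = r2 := by
              rw [hr, show name ++ '"' :: r2 = (name ++ ['"']) ++ r2 from by simp]
              exact List.drop_left' (by simp)
            -- uniqueness of the matching key
            have huniq : ∀ q ∈ pairsLit, q.1 <+: c :: t → q.1 = pvP ++ name ++ ['"'] := by
              intro q hqm hqpre
              obtain ⟨nq, hnqmem, hqshape, hnqf⟩ := key_shape q hqm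
              rw [hdecomp, hr, hqshape] at hqpre
              rw [show pvP ++ nq ++ ['"'] = pvP ++ (nq ++ ['"']) from by simp,
                show pvP ++ (name ++ '"' :: r2) = pvP ++ (name ++ '"' :: r2) from rfl,
                List.prefix_append_right_inj] at hqpre
              rw [hqshape, qf_prefix nq name r2 hnqf hnq hqpre]
            cases hb : bLookup bTableLit name with
            | some v =>
              have hmem : (name, v) ∈ bTableLit := bLookup_mem _ _ _ hb
              have hpmem : (pvP ++ name ++ ['"'], v) ∈ pairsLit := by
                rw [hTblC]
                exact List.mem_map.mpr ⟨(name, v), hmem, rfl⟩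
              have hkpre : pvP ++ name ++ ['"'] <+: c :: t := by
                rw [hdecomp, hr]
                exact ⟨r2, by simp⟩
              have hfind : pvFindRep pairsLit (c :: t) = some (pvP ++ name ++ ['"'], v) := by
                apply pvFindRep_some _ _ _ hpmem hkpre
                intro q hqm hqpre
                have hk := huniq q hqm hqpre
                exact hC2 q hqm _ hpmem (hk ▸ List.prefix_refl _)
              rw [pvScan, hfind]
              rw [pvScanB, if_pos (List.isPrefixOf_iff_prefix.mpr (bAttr_eq ▸ hpre))]
              simp only [← hrdef, ← hname, if_pos hq, hb]
              have hklen : (pvP ++ name ++ ['"']).length - 1 = name.length + 7 := by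
                simp only [List.length_append, List.length_cons, List.length_nil, pvP_len]
                omega
              have hdropt : t.drop (name.length + 7) = r.drop (name.length + 1) := by
                rw [hrdef, List.drop_drop]
                congr 1
                omega
              rw [hklen, hdropt, hdropr]
              rw [ih r2 (by omega)]
            | none =>
              have hfind : pvFindRep pairsLit (c :: t) = none := by
                apply pvFindRep_none
                intro q hqm hqpre
                obtain ⟨nq, hnqmem, hqshape, hnqf⟩ := key_shape q hqm
                have hk := huniq q hqm hqpre
                rw [hqshape] at hk
                have hnqe : nq = name :=
                  List.append_cancel_left (List.append_cancel_right hk)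
                exact bLookup_none _ _ hb q.2 (hnqe ▸ hnqmem)
              rw [pvScan, hfind]
              rw [pvScanB, if_pos (List.isPrefixOf_iff_prefix.mpr (bAttr_eq ▸ hpre))]
              simp only [← hrdef, ← hname, if_pos hq, hb]
              rw [ih t hs']
          · -- no closing quote: name = r, no key can match, both copy c
            have hnr : name = r := by
              have h1 : name <+: r := hname ▸ List.takeWhile_prefix _
              exact h1.eq_of_length (Nat.le_antisymm h1.length_le (by omega))
            have hrq : ∀ x ∈ r, x ≠ '"' := hnr ▸ hnq
            have hfind : pvFindRep pairsLit (c :: t) = none := by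
              apply pvFindRep_none
              intro q hqm hqpre
              obtain ⟨nq, hnqmem, hqshape, hnqf⟩ := key_shape q hqm
              rw [hdecomp, hqshape,
                show pvP ++ nq ++ ['"'] = pvP ++ (nq ++ ['"']) from by simp,
                List.prefix_append_right_inj] at hqpre
              have : '"' ∈ r := hqpre.subset (by simp)
              exact hrq '"' this rfl
            rw [pvScan, hfind]
            rw [pvScanB, if_pos (List.isPrefixOf_iff_prefix.mpr (bAttr_eq ▸ hpre))]
            simp only [← hrdef, ← hname, if_neg hq]
            rw [ih t hs']
        · -- 'class="' does not start here: no key matches, both copy c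
          have hfind : pvFindRep pairsLit (c :: t) = none := by
            apply pvFindRep_none
            intro q hqm hqpre
            exact hpre ((hC1 q hqm).trans hqpre)
          rw [pvScan, hfind]
          rw [pvScanB, if_neg (fun hc => hpre (bAttr_eq ▸ List.isPrefixOf_iff_prefix.mp hc))]
          rw [ih t hs']
  intro s
  exact H s.length s le_rfl

-- ===== VERDICT (by name: the statement is the Claim_ definition above) =====
theorem inline_styles_py_spec : Claim_equal_inline_styles_py := by
  intro content _
  show inline_styles_py content = inline_styles_py_alt content
  have h1 : (inline_styles_py content).toList = pvScan content.toList := by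
    rw [inline_styles_py]
    show ((stylesList).foldl (fun c p => PySem.Str.replace c p.1 p.2) content).toList = _
    rw [toList_foldA, stylesList_toList]
    rw [foldC_eq_foldR pairsLit (fun p hp => (hC0 p hp).1)]
    exact main_eq content.toList
  calc inline_styles_py content
      = String.ofList (inline_styles_py content).toList := String.ofList_toList.symm
    _ = String.ofList (pvScan content.toList) := by rw [h1]
    _ = String.ofList (pvScanB content.toList) := by rw [scanB_eq]
    _ = inline_styles_py_alt content := rfl
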